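-- pv_equiv track=rewrite | github.com/LukasYan30/MPFormer | utils/distill.py | _factor_hw_from_num_tokens
-- ===== SOURCE A (Python) =====
-- from typing import Dict, Optional, Tuple, List, Any, Union
--
-- def _factor_hw_from_num_tokens(
--
--     n_tokens: int,
--     target_hw: Optional[Tuple[int, int]] = None,
-- ) -> Optional[Tuple[int, int]]:
--     """
--     Factor n_tokens into (h, w). Prefer shapes close to target_hw if provided.
--     """
--     if n_tokens <= 0:
--         return None
--
--     pairs = []
--     s = int(n_tokens ** 0.5)
--     for h in range(1, s + 1):
--         if n_tokens % h == 0: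
--             w = n_tokens // h
--             pairs.append((h, w))
--             if h != w:
--                 pairs.append((w, h))
--
--     if len(pairs) == 0:
--         return None
--
--     if target_hw is None:
--         pairs.sort(key=lambda x: abs(x[0] - x[1]))
--         return pairs[0]
--
--     th, tw = int(target_hw[0]), int(target_hw[1])
--
--     def score(hw):
--         h, w = hw
--         return abs(h - th) + abs(w - tw)
--
--     pairs.sort(key=score)
--     return pairs[0]
-- ===== SOURCE B (Python) =====
-- from typing import Optional, Tuple
--
--
-- def _factor_hw_from_num_tokens(
--     n_tokens: int,
--     target_hw: Optional[Tuple[int, int]] = None,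
-- ) -> Optional[Tuple[int, int]]:
--     """
--     Factor n_tokens into (h, w), preferring shapes close to target_hw.
--     Single divisor scan keeping a running best; no pair list, no sort.
--     """
--     if n_tokens <= 0:
--         return None
--
--     if target_hw is None:
--         def score(hw):
--             return abs(hw[0] - hw[1])
--     else:
--         th, tw = int(target_hw[0]), int(target_hw[1])
--
--         def score(hw):
--             return abs(hw[0] - th) + abs(hw[1] - tw)
--
--     best = None
--     best_score = None
--     for h in range(1, int(n_tokens ** 0.5) + 1):
--         if n_tokens % h == 0:
--             w = n_tokens // h
--             for cand in (((h, w), (w, h)) if h != w else ((h, w),)):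
--                 sc = score(cand)
--                 if best is None or sc < best_score:
--                     best, best_score = cand, sc
--     return best
-- ===== Notes on version B (the rewrite author's own statement) =====
-- stated objective: simpler
-- what changed: B drops the pairs list and the stable sort entirely: it scans divisors once, scoring each candidate (h,w) then (w,h) and keeping a strict-less running best, which reproduces the stable sort's first-minimum tie-break.
import Mathlib
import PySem

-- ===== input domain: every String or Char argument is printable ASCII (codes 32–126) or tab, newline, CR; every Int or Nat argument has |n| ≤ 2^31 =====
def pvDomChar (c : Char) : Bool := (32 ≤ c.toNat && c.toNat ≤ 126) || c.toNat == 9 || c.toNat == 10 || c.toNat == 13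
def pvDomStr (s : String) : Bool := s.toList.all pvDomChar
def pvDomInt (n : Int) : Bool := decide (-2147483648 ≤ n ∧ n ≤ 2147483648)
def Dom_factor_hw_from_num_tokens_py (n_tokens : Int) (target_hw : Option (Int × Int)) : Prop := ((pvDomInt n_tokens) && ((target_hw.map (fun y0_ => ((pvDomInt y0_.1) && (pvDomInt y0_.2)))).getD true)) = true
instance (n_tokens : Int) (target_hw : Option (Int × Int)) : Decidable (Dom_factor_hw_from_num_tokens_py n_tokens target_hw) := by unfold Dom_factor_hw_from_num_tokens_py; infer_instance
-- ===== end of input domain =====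

-- B drops A's pair list and stable sort: one divisor scan keeps a running (strict-less) best pair. Same return value; no side effects.

-- ===== PORT A =====
def factor_hw_from_num_tokens_py (n_tokens : Int) (target_hw : Option (Int × Int)) : Option (Int × Int) :=
  if n_tokens ≤ 0 then none
  else
    -- s = int(n_tokens ** 0.5): exact as Nat.sqrt for 0 < n_tokens ≤ 2^31 (double sqrt is correctly rounded there)
    let s : Int := (Nat.sqrt n_tokens.toNat : Int)
    let pairs : List (Int × Int) :=
      (PySem.List.pyRange 1 (s + 1) 1).foldl (fun ps h =>
        if PySem.Int.mod n_tokens h == 0 then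
          let w := PySem.Int.floordiv n_tokens h
          let ps' := ps ++ [(h, w)]
          if h != w then ps' ++ [(w, h)] else ps'
        else ps) []
    if pairs.length == 0 then none
    else
      match target_hw with
      | none =>
          match PySem.List.sorted pairs (fun x => |x.1 - x.2|) with
          | p :: _ => some p
          | [] => none          -- unreachable: guarded by the length check (pairs[0])
      | some (th, tw) =>
          match PySem.List.sorted pairs (fun x => |x.1 - th| + |x.2 - tw|) with
          | p :: _ => some p
          | [] => none          -- unreachable: guarded by the length check (pairs[0])

-- ===== PORT B =====
def factor_hw_from_num_tokens_py_alt (n_tokens : Int) (target_hw : Option (Int × Int)) : Option (Int × Int) :=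
  if n_tokens ≤ 0 then none
  else
    let score : Int × Int → Int :=
      match target_hw with
      | none => fun hw => |hw.1 - hw.2|
      | some (th, tw) => fun hw => |hw.1 - th| + |hw.2 - tw|
    let s : Int := (Nat.sqrt n_tokens.toNat : Int)   -- int(n_tokens ** 0.5), exact on the domain as in port A
    (PySem.List.pyRange 1 (s + 1) 1).foldl (fun best h =>
      if PySem.Int.mod n_tokens h == 0 then
        let w := PySem.Int.floordiv n_tokens h
        (if h != w then [(h, w), (w, h)] else [(h, w)]).foldl (fun best cand =>
          match best with
          | none => some cand
          | some b => if score cand < score b then some cand else some b) best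
      else best) none

-- ===== PRECONDITION & SPEC =====
def Spec_factor_hw_from_num_tokens_py (n_tokens : Int) (target_hw : Option (Int × Int)) (out : Option (Int × Int)) : Prop := out = factor_hw_from_num_tokens_py_alt n_tokens target_hw
instance (n_tokens : Int) (target_hw : Option (Int × Int)) (out : Option (Int × Int)) : Decidable (Spec_factor_hw_from_num_tokens_py n_tokens target_hw out) := by unfold Spec_factor_hw_from_num_tokens_py; infer_instance

-- ===== CLAIM (what is proved, stated in full; the proofs are below) =====
def Claim_equal_factor_hw_from_num_tokens_py : Prop := ∀ (n_tokens : Int) (target_hw : Option (Int × Int)), Dom_factor_hw_from_num_tokens_py n_tokens target_hw → Spec_factor_hw_from_num_tokens_py n_tokens target_hw (factor_hw_from_num_tokens_py n_tokens target_hw)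

-- ===== LEMMAS AND PROOFS =====

-- the candidate pairs contributed by one divisor test h (empty when h does not divide n)
def pvCands (n h : Int) : List (Int × Int) :=
  if PySem.Int.mod n h == 0 then
    let w := PySem.Int.floordiv n h
    if h != w then [(h, w), (w, h)] else [(h, w)]
  else []

-- running first-strict-min over a nonempty prefix
def pvRunMin (k : Int × Int → Int) (a : Int × Int) (l : List (Int × Int)) : Int × Int :=
  l.foldl (fun b x => if k x < k b then x else b) a

-- B's optional running best
def pvBest (k : Int × Int → Int) : Option (Int × Int) → Int × Int → Option (Int × Int) :=
  fun best cand =>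
    match best with
    | none => some cand
    | some b => if k cand < k b then some cand else some b

lemma pvBest_some (k : Int × Int → Int) (l : List (Int × Int)) :
    ∀ a, l.foldl (pvBest k) (some a) = some (pvRunMin k a l) := by
  induction l with
  | nil => intro a; rfl
  | cons x t ih =>
      intro a
      simp only [List.foldl_cons, pvBest, pvRunMin]
      by_cases h : k x < k a <;> simp [h, ih, pvRunMin]

lemma pvBest_flatMap (k : Int × Int → Int) (g : Int → List (Int × Int)) (r : List Int) :
    ∀ b, r.foldl (fun b h => (g h).foldl (pvBest k) b) b = (r.flatMap g).foldl (pvBest k) b := by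
  induction r with
  | nil => intro b; rfl
  | cons x t ih => intro b; simp [List.flatMap_cons, List.foldl_append, ih]

-- head of the stable insertion sort is the first element of minimal key
lemma pvHead_foldl_insertBy (k : Int × Int → Int) (l : List (Int × Int)) :
    ∀ (a : Int × Int) (t : List (Int × Int)), ∃ t',
      l.foldl (fun ys x => PySem.List.insertBy (fun u v => decide (k u < k v)) x ys) (a :: t)
        = pvRunMin k a l :: t' := by
  induction l with
  | nil => intro a t; exact ⟨t, rfl⟩
  | cons x l ih =>
      intro a t
      have hins : PySem.List.insertBy (fun u v => decide (k u < k v)) x (a :: t)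
          = if k x < k a then x :: a :: t else a :: PySem.List.insertBy (fun u v => decide (k u < k v)) x t := by
        simp [PySem.List.insertBy]
      by_cases h : k x < k a
      · simp only [List.foldl_cons, hins, if_pos h]
        obtain ⟨t', ht'⟩ := ih x (a :: t)
        exact ⟨t', by simpa [pvRunMin, h] using ht'⟩
      · simp only [List.foldl_cons, hins, if_neg h]
        obtain ⟨t', ht'⟩ := ih a (PySem.List.insertBy (fun u v => decide (k u < k v)) x t)
        exact ⟨t', by simpa [pvRunMin, h] using ht'⟩

lemma pvSorted_cons (k : Int × Int → Int) (p : Int × Int) (rest : List (Int × Int)) :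
    ∃ t', PySem.List.sorted (p :: rest) k = pvRunMin k p rest :: t' := by
  rw [PySem.List.sorted_eq_foldl_insertBy]
  simp only [List.foldl_cons]
  have h1 : PySem.List.insertBy (fun u v => decide (k u < k v)) p ([] : List (Int × Int)) = [p] := by
    simp [PySem.List.insertBy]
  rw [h1]
  exact pvHead_foldl_insertBy k rest p []

-- A's sorted-head equals B's running best, for any key and pair list
lemma pvHead_eq_best (k : Int × Int → Int) (pairs : List (Int × Int)) :
    (match PySem.List.sorted pairs k with
      | p :: _ => some p
      | [] => none) = pairs.foldl (pvBest k) none := by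
  cases pairs with
  | nil => rfl
  | cons p rest =>
      obtain ⟨t', ht'⟩ := pvSorted_cons k p rest
      rw [ht']
      rw [List.foldl_cons, show pvBest k none p = some p from rfl, pvBest_some]

-- A's pair-list builder step is an append of pvCands
lemma pvBuilder_eq_flatMap (n : Int) (r : List Int) :
    r.foldl (fun ps h =>
      if PySem.Int.mod n h == 0 then
        let w := PySem.Int.floordiv n h
        let ps' := ps ++ [(h, w)]
        if h != w then ps' ++ [(w, h)] else ps'
      else ps) [] = r.flatMap (pvCands n) := by
  have hstep : (fun (ps : List (Int × Int)) (h : Int) =>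
      if PySem.Int.mod n h == 0 then
        let w := PySem.Int.floordiv n h
        let ps' := ps ++ [(h, w)]
        if h != w then ps' ++ [(w, h)] else ps'
      else ps) = fun ps h => ps ++ pvCands n h := by
    funext ps h
    simp only [pvCands]
    split_ifs <;> simp
  rw [hstep, PySem.List.foldl_append_eq_flatMap]
  simp

-- ===== VERDICT (by name: the statement is the Claim_ definition above) =====
theorem factor_hw_from_num_tokens_py_spec : Claim_equal_factor_hw_from_num_tokens_py := by
  intro n t _hdom
  unfold Spec_factor_hw_from_num_tokens_py factor_hw_from_num_tokens_py factor_hw_from_num_tokens_py_alt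
  by_cases hn : n ≤ 0
  · simp [hn]
  · simp only [if_neg hn]
    set r := PySem.List.pyRange 1 ((Nat.sqrt n.toNat : Int) + 1) 1 with hr
    have hB : ∀ (k : Int × Int → Int),
        r.foldl (fun best h =>
          if PySem.Int.mod n h == 0 then
            let w := PySem.Int.floordiv n h
            (if h != w then [(h, w), (w, h)] else [(h, w)]).foldl (pvBest k) best
          else best) none = (r.flatMap (pvCands n)).foldl (pvBest k) none := by
      intro k
      rw [← pvBest_flatMap k (pvCands n) r none]
      apply PySem.List.foldl_congr_mem
      intro b h _
      by_cases h1 : (PySem.Int.mod n h == 0) = true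
      · simp only [pvCands, if_pos h1]
      · simp only [pvCands, if_neg h1, List.foldl_nil]
    rw [pvBuilder_eq_flatMap n r]
    set pairs := r.flatMap (pvCands n) with hp
    have main : ∀ (k : Int × Int → Int),
        (if (pairs.length == 0) = true then none
         else match PySem.List.sorted pairs k with
              | p :: _ => some p
              | [] => none)
          = r.foldl (fun best h =>
              if PySem.Int.mod n h == 0 then
                let w := PySem.Int.floordiv n h
                (if h != w then [(h, w), (w, h)] else [(h, w)]).foldl (pvBest k) best
              else best) none := by
      intro k
      by_cases hq : pairs.length = 0
      · have hnil : pairs = [] := List.eq_nil_of_length_eq_zero hq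
        rw [if_pos (by simp [hq])]
        rw [hB k, hnil]
        rfl
      · rw [if_neg (by simp [hq])]
        exact (pvHead_eq_best k pairs).trans (hB k).symm
    cases t with
    | none => exact main (fun x => |x.1 - x.2|)
    | some thw =>
        obtain ⟨th, tw⟩ := thw
        exact main (fun x => |x.1 - th| + |x.2 - tw|)
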